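-- pv_equiv track=rewrite | github.com/ChineseResearcher/l33tc0d3-dump | dynamic_programming/Q3592 Inverse Coin Change.py | findCoins
-- ===== SOURCE A (Python) =====
-- from typing import List
--
-- def findCoins(numWays: List[int]) -> List[int]:
--
--     n = len(numWays)
--     # core ideas:
--     # 1) find the smallest denomination first. How?
--     # the smallest denomination will be the smallest i s.t. numWays[i] = 1
--     # this is because there's only 1 way to form amount i using denomination i
--
--     # 2) our denomination set start w/ the found denomination in (1)
--     # and we gradually expand our set
--
--     # 3) how is a new denomination identified?
--     # it's important to see that for every numWays[i],
--     # we are solving a coin change II problem that sums to amount = numWays[i]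
--     # w/ some set of found denominations, and if dp[i] happens to be
--     # exactly 1 smaller than numWays[i], we know that i itself has to
--     # be appended as a new denomination
--
--     ans = []
--     # locate the first denomination
--     for i, numWay in enumerate(numWays):
--         if numWay == 1:
--             ans.append(i+1)
--             break
--
--     for i, numWay in enumerate(numWays):
--         amount = i + 1
--         dp = [0] * (n + 1)
--         dp[0] = 1 # always possible to form amount 0 using no coins
--
--         for coin in ans:
--             for coinSum in range(coin, amount + 1):
--                 dp[coinSum] += dp[coinSum - coin]
--
--         if dp[amount] > numWay or dp[amount] < numWay - 1:
--             return []
--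
--         if dp[amount] == numWay - 1:
--             ans.append(amount)
--
--     return ans
-- ===== SOURCE B (Python) =====
-- from typing import List
--
-- def findCoins(numWays: List[int]) -> List[int]:
--     # One shared dp array, updated once per discovered coin, instead of
--     # rebuilding the whole dp table for every amount.
--     n = len(numWays)
--     dp = [0] * (n + 1)
--     dp[0] = 1
--     ans = []
--     for i, w in enumerate(numWays):
--         amount = i + 1
--         if dp[amount] == w - 1:
--             ans.append(amount)
--             for s in range(amount, n + 1):
--                 dp[s] += dp[s - amount]
--         elif dp[amount] != w:
--             return []
--     return ans
-- ===== Notes on version B (the rewrite author's own statement) =====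
-- stated objective: alternative
-- what changed: B keeps one dp array updated incrementally (one pass per discovered coin) instead of rebuilding the whole coin-change dp table from scratch for every amount, and drops A's separate first-coin search loop.
import Mathlib
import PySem

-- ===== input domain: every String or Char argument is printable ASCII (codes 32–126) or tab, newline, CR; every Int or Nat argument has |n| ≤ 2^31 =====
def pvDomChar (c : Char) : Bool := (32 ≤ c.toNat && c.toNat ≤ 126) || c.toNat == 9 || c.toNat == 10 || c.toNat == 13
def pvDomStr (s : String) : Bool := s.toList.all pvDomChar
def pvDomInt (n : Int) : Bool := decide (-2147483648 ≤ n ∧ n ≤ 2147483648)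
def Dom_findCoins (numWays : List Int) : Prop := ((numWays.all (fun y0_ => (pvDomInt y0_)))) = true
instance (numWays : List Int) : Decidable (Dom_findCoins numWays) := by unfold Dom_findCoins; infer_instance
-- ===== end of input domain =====

-- ===== PORT A =====
-- B maintains one incremental dp array (updated once per discovered coin) instead of rebuilding the dp table per amount; same return value.

-- dp = [0]*(n+1); dp[0] = 1
def pvInit (n : Nat) : List Int := (List.replicate (n + 1) (0 : Int)).set 0 1

-- "for coinSum in range(coin, cap+1): dp[coinSum] += dp[coinSum - coin]"
-- indices are Nats because coin = i+1 and coinSum >= coin are provably nonnegative in both Pythons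
def pvUpd (cap : Nat) (dp : List Int) (coin : Nat) : List Int :=
  (List.range' coin (cap + 1 - coin)).foldl
    (fun d s => d.set s (d.getD s 0 + d.getD (s - coin) 0)) dp

-- first loop of A: find the first i with numWays[i] == 1, ans = [i+1] (break), else []
def pvSeedAux : List Int → Nat → List Nat
  | [], _ => []
  | w :: rest, i => if w = 1 then [i + 1] else pvSeedAux rest (i + 1)

-- second loop of A: rebuild dp from scratch for each amount
def pvLoopA : List Int → Nat → Nat → List Nat → List Nat
  | [], _, _, ans => ans
  | w :: rest, i, n, ans =>
    let amount := i + 1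
    let dp := ans.foldl (pvUpd amount) (pvInit n)
    let v := dp.getD amount 0
    if v > w ∨ v < w - 1 then []
    else if v = w - 1 then pvLoopA rest (i + 1) n (ans ++ [amount])
    else pvLoopA rest (i + 1) n ans

def findCoins (numWays : List Int) : List Int :=
  (pvLoopA numWays 0 numWays.length (pvSeedAux numWays 0)).map Int.ofNat

-- ===== PORT B =====
-- B's loop: one dp array carried along, updated once per discovered coin
def pvLoopB : List Int → Nat → Nat → List Nat → List Int → List Nat
  | [], _, _, ans, _ => ans
  | w :: rest, i, n, ans, dp =>
    let amount := i + 1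
    let v := dp.getD amount 0
    if v = w - 1 then pvLoopB rest (i + 1) n (ans ++ [amount]) (pvUpd n dp amount)
    else if v ≠ w then []
    else pvLoopB rest (i + 1) n ans dp

def findCoins_alt (numWays : List Int) : List Int :=
  (pvLoopB numWays 0 numWays.length [] (pvInit numWays.length)).map Int.ofNat

-- ===== PRECONDITION & SPEC =====
def Spec_findCoins (numWays : List Int) (out : List Int) : Prop := out = findCoins_alt numWays
instance (numWays : List Int) (out : List Int) : Decidable (Spec_findCoins numWays out) := by unfold Spec_findCoins; infer_instance

-- ===== CLAIM (what is proved, stated in full; the proofs are below) =====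
def Claim_equal_findCoins : Prop := ∀ (numWays : List Int), Dom_findCoins numWays → Spec_findCoins numWays (findCoins numWays)

-- ===== LEMMAS AND PROOFS =====

theorem pvStep_length (c : Nat) (l : List Nat) (dp : List Int) :
    (l.foldl (fun d s => d.set s (d.getD s 0 + d.getD (s - c) 0)) dp).length = dp.length := by
  induction l generalizing dp with
  | nil => rfl
  | cons s t ih => simp only [List.foldl_cons]; rw [ih]; simp

theorem pvUpd_length (cap : Nat) (dp : List Int) (c : Nat) :
    (pvUpd cap dp c).length = dp.length := by
  unfold pvUpd; exact pvStep_length c _ dp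

theorem gd_set (d : List Int) (s j : Nat) (v : Int) :
    (d.set s v).getD j 0 = if s = j ∧ s < d.length then v else d.getD j 0 := by
  simp only [List.getD_eq_getElem?_getD, List.getElem?_set]
  by_cases h : s = j
  · subst h
    by_cases hl : s < d.length <;> simp [hl]
  · simp [h]

-- a fold that only writes at positions > j leaves getD j unchanged
theorem gd_fold_high (c j : Nat) (l : List Nat) (dp : List Int) (h : ∀ s ∈ l, j < s) :
    (l.foldl (fun d s => d.set s (d.getD s 0 + d.getD (s - c) 0)) dp).getD j 0 = dp.getD j 0 := by
  induction l generalizing dp with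
  | nil => rfl
  | cons s t ih =>
    simp only [List.foldl]
    rw [ih _ (fun x hx => h x (List.mem_cons_of_mem _ hx)), gd_set]
    have : ¬ s = j := by have := h s (List.mem_cons_self) ; omega
    simp [this]

-- common-prefix fold preserves pointwise agreement at positions ≤ m
theorem gd_fold_agree (c m : Nat) (l : List Nat) :
    ∀ (dp1 dp2 : List Int), dp1.length = dp2.length →
    (∀ j, j ≤ m → dp1.getD j 0 = dp2.getD j 0) → (∀ s ∈ l, s ≤ m) →
    ∀ j, j ≤ m →
      (l.foldl (fun d s => d.set s (d.getD s 0 + d.getD (s - c) 0)) dp1).getD j 0 =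
      (l.foldl (fun d s => d.set s (d.getD s 0 + d.getD (s - c) 0)) dp2).getD j 0 := by
  induction l with
  | nil => intro dp1 dp2 _ hag _ j hj; exact hag j hj
  | cons s t ih =>
    intro dp1 dp2 hlen hag hmem j hj
    have hs : s ≤ m := hmem s List.mem_cons_self
    simp only [List.foldl]
    apply ih _ _ (by simp [hlen]) _ (fun x hx => hmem x (List.mem_cons_of_mem _ hx)) j hj
    intro k hk
    rw [gd_set, gd_set, hlen]
    have hv : dp1.getD s 0 + dp1.getD (s - c) 0 = dp2.getD s 0 + dp2.getD (s - c) 0 := by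
      rw [hag s hs, hag (s - c) (by omega)]
    split_ifs with h
    · exact hv
    · exact hag k hk

-- dp update with cap m and cap n agree below m (coins are positive, m ≤ n)
theorem pvUpd_agree (c m n : Nat) (hm : m ≤ n) (dp1 dp2 : List Int)
    (hlen : dp1.length = dp2.length)
    (hag : ∀ j, j ≤ m → dp1.getD j 0 = dp2.getD j 0) :
    ∀ j, j ≤ m → (pvUpd m dp1 c).getD j 0 = (pvUpd n dp2 c).getD j 0 := by
  intro j hj
  by_cases hc : m < c
  · have h1 : m + 1 - c = 0 := by omega
    unfold pvUpd
    rw [h1]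
    simp only [List.range'_zero, List.foldl_nil]
    rw [gd_fold_high c j _ _ (by intro s hs; rcases List.mem_range'_1.mp hs with ⟨h2, _⟩; omega)]
    exact hag j hj
  · have hsplit : n + 1 - c = (m + 1 - c) + (n - m) := by omega
    have ha : c + (m + 1 - c) = m + 1 := by omega
    have hR : (pvUpd n dp2 c).getD j 0 =
        ((List.range' c (m + 1 - c)).foldl
          (fun d s => d.set s (d.getD s 0 + d.getD (s - c) 0)) dp2).getD j 0 := by
      unfold pvUpd
      rw [hsplit, ← List.range'_append_1, List.foldl_append, ha]
      refine gd_fold_high c j _ _ ?_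
      intro s hs
      have h2 := (List.mem_range'_1.mp hs).1
      omega
    rw [hR]
    unfold pvUpd
    refine gd_fold_agree c m _ dp1 dp2 hlen hag ?_ j hj
    intro s hs
    have h3 := (List.mem_range'_1.mp hs).2
    rw [ha] at h3
    have h4 := (List.mem_range'_1.mp hs).1
    omega

theorem pvInit_length (n : Nat) : (pvInit n).length = n + 1 := by simp [pvInit]

theorem pvInit_gd (n j : Nat) : (pvInit n).getD j 0 = if j = 0 then 1 else 0 := by
  unfold pvInit
  rw [gd_set]
  by_cases h : j = 0
  · simp [h]
  · have h' : ¬ (0 = j) := fun e => h e.symm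
    simp [h, h', List.getD_replicate]

-- A's per-amount rebuilt dp agrees with B's full-range dp at positions ≤ m
theorem fold_coins_agree (m n : Nat) (hm : m ≤ n) (ans : List Nat) :
    ∀ (dp1 dp2 : List Int), dp1.length = dp2.length →
    (∀ j, j ≤ m → dp1.getD j 0 = dp2.getD j 0) →
    ∀ j, j ≤ m →
      (ans.foldl (pvUpd m) dp1).getD j 0 = (ans.foldl (pvUpd n) dp2).getD j 0 := by
  induction ans with
  | nil => intro dp1 dp2 _ hag j hj; exact hag j hj
  | cons c t ih =>
    intro dp1 dp2 hlen hag j hj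
    simp only [List.foldl]
    exact ih _ _ (by rw [pvUpd_length, pvUpd_length, hlen])
      (pvUpd_agree c m n hm dp1 dp2 hlen hag) j hj

-- main-loop equivalence: B's carried dp equals the full-range fold over ans
theorem loop_eq (n : Nat) : ∀ (s : List Int) (i : Nat) (ans : List Nat),
    i + s.length = n →
    pvLoopA s i n ans = pvLoopB s i n ans (ans.foldl (pvUpd n) (pvInit n)) := by
  intro s
  induction s with
  | nil => intro i ans _; rfl
  | cons w rest ih =>
    intro i ans hn
    have hamt : i + 1 ≤ n := by simp at hn; omega
    have hrest : i + 1 + rest.length = n := by simp at hn; omega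
    simp only [pvLoopA, pvLoopB]
    rw [fold_coins_agree (i + 1) n hamt ans _ _ rfl (fun _ _ => rfl) (i + 1) (le_refl _)]
    set v := (ans.foldl (pvUpd n) (pvInit n)).getD (i + 1) 0
    by_cases h1 : v = w - 1
    · have hA : ¬ (v > w ∨ v < w - 1) := by omega
      rw [if_neg hA, if_pos h1, if_pos h1, ih (i + 1) (ans ++ [i + 1]) (by simpa using hrest),
        List.foldl_append]
      rfl
    · by_cases h2 : v > w ∨ v < w - 1
      · have h3 : v ≠ w := by omega
        rw [if_pos h2, if_neg h1, if_pos h3]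
      · have h3 : ¬ (v ≠ w) := by omega
        rw [if_neg h2, if_neg h1, if_neg h1, if_neg h3]
        exact ih (i + 1) ans hrest

-- every coin produced by the seed scan of the suffix starting at i exceeds i
theorem seed_gt (s : List Int) : ∀ (i c : Nat), c ∈ pvSeedAux s i → i + 1 ≤ c := by
  induction s with
  | nil => intro i c h; simp [pvSeedAux] at h
  | cons w rest ih =>
    intro i c h
    simp only [pvSeedAux] at h
    split_ifs at h with hw
    · simp at h; omega
    · have := ih (i + 1) c h; omega

-- seeding: A's pre-found first coin versus B's empty start
theorem seed_eq (n : Nat) : ∀ (s : List Int) (i : Nat), i + s.length = n →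
    pvLoopA s i n (pvSeedAux s i) = pvLoopB s i n [] (pvInit n) := by
  intro s
  induction s with
  | nil => intro i _; rfl
  | cons w rest ih =>
    intro i hn
    have hamt : i + 1 ≤ n := by simp at hn; omega
    have hrest : i + 1 + rest.length = n := by simp at hn; omega
    by_cases hw : w = 1
    · -- first 1 found here: A pre-seeds [i+1]; B discovers the same coin now
      simp only [pvSeedAux, if_pos hw, pvLoopA, pvLoopB]
      have hvA : ([i + 1].foldl (pvUpd (i + 1)) (pvInit n)).getD (i + 1) 0 = 1 := by
        simp only [List.foldl]
        unfold pvUpd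
        have h1 : i + 1 + 1 - (i + 1) = 1 := by omega
        rw [h1]
        simp only [List.range'_one, List.foldl_cons, List.foldl_nil]
        rw [gd_set, if_pos ⟨rfl, by rw [pvInit_length]; omega⟩]
        have h2 : i + 1 - (i + 1) = 0 := by omega
        rw [h2, pvInit_gd, pvInit_gd]
        norm_num
      have hvB : (pvInit n).getD (i + 1) 0 = 0 := by rw [pvInit_gd]; simp
      rw [hvA, hvB, hw]
      rw [if_neg (by norm_num), if_neg (by norm_num), if_pos (by norm_num),
        loop_eq n rest (i + 1) [i + 1] hrest]
      rfl
    · simp only [pvSeedAux, if_neg hw, pvLoopA, pvLoopB]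
      have hgt : ∀ c ∈ pvSeedAux rest (i + 1), i + 2 ≤ c := fun c hc => seed_gt rest (i + 1) c hc
      have hvA : ((pvSeedAux rest (i + 1)).foldl (pvUpd (i + 1)) (pvInit n)).getD (i + 1) 0 = 0 := by
        have hfix : (pvSeedAux rest (i + 1)).foldl (pvUpd (i + 1)) (pvInit n) = pvInit n := by
          generalize hL : pvSeedAux rest (i + 1) = L at hgt
          clear hL
          induction L with
          | nil => rfl
          | cons c t iht =>
            simp only [List.foldl]
            have hc : i + 2 ≤ c := hgt c List.mem_cons_self
            have hid : pvUpd (i + 1) (pvInit n) c = pvInit n := by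
              unfold pvUpd
              have h0 : i + 1 + 1 - c = 0 := by omega
              rw [h0]; rfl
            rw [hid]
            exact iht (fun x hx => hgt x (List.mem_cons_of_mem _ hx))
        rw [hfix, pvInit_gd]; simp
      have hvB : (pvInit n).getD (i + 1) 0 = 0 := by rw [pvInit_gd]; simp
      rw [hvA, hvB]
      by_cases h2 : (0 : Int) > w ∨ (0 : Int) < w - 1
      · have h1 : ¬ ((0 : Int) = w - 1) := by
          intro h; apply hw; omega
        have h3 : (0 : Int) ≠ w := by
          rcases h2 with h2 | h2 <;> omega
        rw [if_pos h2, if_neg h1, if_pos h3]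
      · have hw0 : w = 0 := by
          rcases not_or.mp h2 with ⟨ha1, ha2⟩
          have hne : ¬ w = 1 := hw
          omega
        have h1 : ¬ ((0 : Int) = w - 1) := by omega
        have h3 : ¬ ((0 : Int) ≠ w) := by omega
        rw [if_neg h2, if_neg h1, if_neg h1, if_neg h3]
        exact ih (i + 1) hrest

-- ===== VERDICT (by name: the statement is the Claim_ definition above) =====
theorem findCoins_spec : Claim_equal_findCoins := by
  intro numWays _
  unfold Spec_findCoins findCoins findCoins_alt
  rw [seed_eq numWays.length numWays 0 (by simp)]
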